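-- pv_equiv track=rewrite | github.com/apsz/python-learning | Codility/TapeEquilibrium.py | solution
-- ===== SOURCE A (Python) =====
-- import heapq
--
-- def solution(A):
--     h = []
--     val_a = 0
--     val_b = 0
--     for i in range(len(A)):
--         if i == 0:
--             continue
--         if i == 1:
--             val_a = sum(A[:i])
--             val_b = sum(A[i:])
--             diff = abs(val_a - val_b)
--             heapq.heappush(h, diff)
--             continue
--         val_a = val_a + A[i-1]
--         val_b = val_b - A[i-1]
--         diff = abs(val_a - val_b)
--         heapq.heappush(h, diff)
--     return h[0]
-- ===== SOURCE B (Python) =====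
-- def solution(A):
--     total = sum(A)
--     pref = 0
--     best = None
--     for x in A[:-1]:
--         pref += x
--         d = abs(2 * pref - total)
--         if best is None or d < best:
--             best = d
--     return best
-- ===== Notes on version B (the rewrite author's own statement) =====
-- stated objective: faster
-- what changed: B replaces the heap of all split differences (heappush per split, root at the end) by a single O(n) pass keeping a running prefix sum and a running minimum of |2*prefix - total|.
-- outside the precondition, e.g. on solution([5]): A raises IndexError, B returns None; on solution([]): A raises IndexError, B returns None
import Mathlib
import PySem

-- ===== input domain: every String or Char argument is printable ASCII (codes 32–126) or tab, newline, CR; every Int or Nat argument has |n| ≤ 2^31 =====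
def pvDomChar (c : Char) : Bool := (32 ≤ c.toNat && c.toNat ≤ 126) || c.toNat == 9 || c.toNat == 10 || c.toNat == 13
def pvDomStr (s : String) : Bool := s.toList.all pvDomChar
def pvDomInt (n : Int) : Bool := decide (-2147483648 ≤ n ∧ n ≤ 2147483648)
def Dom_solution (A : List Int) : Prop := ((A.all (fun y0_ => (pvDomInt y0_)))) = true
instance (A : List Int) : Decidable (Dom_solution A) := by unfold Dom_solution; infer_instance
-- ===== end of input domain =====

-- B replaces A's heap of all split differences by one O(n) running-prefix/running-min pass (same return value on lists of length ≥ 2).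

-- ===== PORT A =====
-- literal port of heapq._siftdown (sift-up after append): walk to the root, moving parents down while item < parent
def pySiftdown (h : List Int) (pos : Nat) (item : Int) : List Int :=
  if hp : 0 < pos then
    if item < h.getD ((pos - 1) / 2) 0 then
      pySiftdown (h.set pos (h.getD ((pos - 1) / 2) 0)) ((pos - 1) / 2) item
    else h.set pos item
  else h.set pos item
termination_by pos
decreasing_by omega

-- literal port of heapq.heappush: append, then sift up from the last slot
def pyHeappush (h : List Int) (x : Int) : List Int := pySiftdown (h ++ [x]) h.length x

def solution (A : List Int) : Int :=
  let st := (PySem.List.pyRange 0 (A.length : Int) 1).foldl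
    (fun (s : List Int × Int × Int) (i : Int) =>
      if i = 0 then s
      else if i = 1 then
        let va := (PySem.List.slice A none (some i)).sum
        let vb := (PySem.List.slice A (some i) none).sum
        let diff := |va - vb|
        (pyHeappush s.1 diff, va, vb)
      else
        let va := s.2.1 + PySem.List.pyGetD A (i - 1) 0
        let vb := s.2.2 - PySem.List.pyGetD A (i - 1) 0
        let diff := |va - vb|
        (pyHeappush s.1 diff, va, vb))
    ([], 0, 0)
  PySem.List.pyGetD st.1 0 0   -- h[0]: IndexError on an empty heap, excluded by Pre_solution

-- ===== PORT B =====
def solution_alt (A : List Int) : Int :=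
  let total := A.sum
  let r := (PySem.List.slice A none (some (-1))).foldl
    (fun (s : Int × Option Int) (x : Int) =>
      let pref := s.1 + x
      let d := |2 * pref - total|
      let best := match s.2 with
        | none => some d
        | some b => if d < b then some d else some b
      (pref, best))
    (0, none)
  r.2.getD 0   -- best is still None only when len(A) < 2, excluded by Pre_solution

-- ===== PRECONDITION & SPEC =====
-- A raises IndexError (empty heap h[0]) when len(A) < 2, and B returns None there: excluded.
def Pre_solution (A : List Int) : Prop := 2 ≤ A.length
instance (A : List Int) : Decidable (Pre_solution A) := by unfold Pre_solution; infer_instance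
def pvWitness_solution : List Int := [3, 1, 2, 4, 3]

def Spec_solution (A : List Int) (out : Int) : Prop := out = solution_alt A
instance (A : List Int) (out : Int) : Decidable (Spec_solution A out) := by unfold Spec_solution; infer_instance

-- ===== CLAIM (what is proved, stated in full; the proofs are below) =====
def Claim_equal_solution : Prop := ∀ (A : List Int), Dom_solution A → Pre_solution A → Spec_solution A (solution A)

-- ===== LEMMAS AND PROOFS =====

-- getD facts about set/append used throughout the heap proofs
theorem getD_set_ne (h : List Int) (p i : Nat) (v d : Int) (hne : i ≠ p) :
    (h.set p v).getD i d = h.getD i d := by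
  simp [List.getD, List.getElem?_set_ne (Ne.symm hne)]

theorem getD_set_self (h : List Int) (p : Nat) (v d : Int) (hp : p < h.length) :
    (h.set p v).getD p d = v := by
  simp [List.getD, hp]

-- the heap property of heapq: every non-root element dominates its parent
def IsHeap (h : List Int) : Prop :=
  ∀ i : Nat, 0 < i → i < h.length → h.getD ((i - 1) / 2) 0 ≤ h.getD i 0

-- heap property everywhere except at the hole `pos`
def HoleHeap (h : List Int) (pos : Nat) : Prop :=
  ∀ i : Nat, 0 < i → i < h.length → i ≠ pos → h.getD ((i - 1) / 2) 0 ≤ h.getD i 0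

-- the children of the hole dominate both the item being sifted and the hole's parent
def HoleKids (h : List Int) (pos : Nat) (item : Int) : Prop :=
  ∀ c : Nat, 0 < c → c < h.length → (c - 1) / 2 = pos →
    item ≤ h.getD c 0 ∧ (0 < pos → h.getD ((pos - 1) / 2) 0 ≤ h.getD c 0)

-- with the heap property away from the hole, the root is below every index left of the hole
theorem root_le_of_holeHeap (h : List Int) (pos : Nat) (H : HoleHeap h pos) :
    ∀ j : Nat, j < pos → j < h.length → h.getD 0 0 ≤ h.getD j 0 := by
  intro j
  induction j using Nat.strong_induction_on with
  | _ j ih =>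
    intro hjp hjl
    rcases Nat.eq_zero_or_pos j with h0 | h0
    · subst h0; exact le_refl _
    · exact le_trans (ih ((j - 1) / 2) (by omega) (by omega) (by omega)) (H j h0 hjl (by omega))

-- main sift-up lemma: heap restored, length kept, and the root becomes min(old root, item)
theorem pySiftdown_spec : ∀ (pos : Nat) (h : List Int) (item : Int),
    pos < h.length → HoleHeap h pos → HoleKids h pos item →
    IsHeap (pySiftdown h pos item) ∧ (pySiftdown h pos item).length = h.length ∧
      (pySiftdown h pos item).getD 0 0 =
        (if pos = 0 then item else min (h.getD 0 0) item) := by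
  intro pos
  induction pos using Nat.strong_induction_on with
  | _ pos ih =>
    intro h item hlen H1 H2
    unfold pySiftdown
    by_cases hp : 0 < pos
    · rw [dif_pos hp]
      by_cases hlt : item < h.getD ((pos - 1) / 2) 0
      · rw [if_pos hlt]
        have c1 : (pos - 1) / 2 < (h.set pos (h.getD ((pos - 1) / 2) 0)).length := by
          simp [List.length_set]; omega
        have c2 : HoleHeap (h.set pos (h.getD ((pos - 1) / 2) 0)) ((pos - 1) / 2) := by
          intro i hi hil hip
          rw [List.length_set] at hil
          by_cases hipos : i = pos
          · subst hipos
            rw [getD_set_ne h i ((i - 1) / 2) _ 0 (by omega),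
              getD_set_self h i _ 0 hlen]
          · by_cases hchild : (i - 1) / 2 = pos
            · rw [hchild, getD_set_self h pos _ 0 hlen, getD_set_ne h pos i _ 0 hipos]
              exact (H2 i hi hil hchild).2 hp
            · rw [getD_set_ne h pos ((i - 1) / 2) _ 0 hchild, getD_set_ne h pos i _ 0 hipos]
              exact H1 i hi hil hipos
        have c3 : HoleKids (h.set pos (h.getD ((pos - 1) / 2) 0)) ((pos - 1) / 2) item := by
          intro c hc hcl hcp
          rw [List.length_set] at hcl
          constructor
          · by_cases hcpos : c = pos
            · subst hcpos
              rw [getD_set_self h c _ 0 hlen]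
              exact le_of_lt hlt
            · rw [getD_set_ne h pos c _ 0 hcpos]
              have := H1 c hc hcl hcpos
              rw [hcp] at this
              exact le_trans (le_of_lt hlt) this
          · intro hppos
            have hgp : ((pos - 1) / 2 - 1) / 2 ≠ pos := by omega
            rw [getD_set_ne h pos _ _ 0 hgp]
            have hroot : h.getD (((pos - 1) / 2 - 1) / 2) 0 ≤ h.getD ((pos - 1) / 2) 0 :=
              H1 ((pos - 1) / 2) hppos (by omega) (by omega)
            by_cases hcpos : c = pos
            · subst hcpos
              rw [getD_set_self h c _ 0 hlen]
              exact hroot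
            · rw [getD_set_ne h pos c _ 0 hcpos]
              have := H1 c hc hcl hcpos
              rw [hcp] at this
              exact le_trans hroot this
        obtain ⟨A1, A2, A3⟩ := ih ((pos - 1) / 2) (by omega) _ item c1 c2 c3
        refine ⟨A1, ?_, ?_⟩
        · rw [A2, List.length_set]
        · rw [A3, if_neg (by omega : ¬ pos = 0)]
          by_cases hp0 : (pos - 1) / 2 = 0
          · rw [if_pos hp0]
            rw [hp0] at hlt
            rw [min_eq_right (le_of_lt hlt)]
          · rw [if_neg hp0, getD_set_ne h pos 0 _ 0 (by omega)]
      · rw [if_neg hlt]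
        refine ⟨?_, List.length_set .., ?_⟩
        · intro i hi hil
          rw [List.length_set] at hil
          by_cases hipos : i = pos
          · subst hipos
            rw [getD_set_ne h i ((i - 1) / 2) _ 0 (by omega), getD_set_self h i _ 0 hlen]
            exact le_of_not_gt hlt
          · by_cases hchild : (i - 1) / 2 = pos
            · rw [hchild, getD_set_self h pos _ 0 hlen, getD_set_ne h pos i _ 0 hipos]
              exact (H2 i hi hil hchild).1
            · rw [getD_set_ne h pos ((i - 1) / 2) _ 0 hchild, getD_set_ne h pos i _ 0 hipos]
              exact H1 i hi hil hipos
        · rw [if_neg (by omega : ¬ pos = 0), getD_set_ne h pos 0 _ 0 (by omega)]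
          have hroot : h.getD 0 0 ≤ h.getD ((pos - 1) / 2) 0 :=
            root_le_of_holeHeap h pos H1 ((pos - 1) / 2) (by omega) (by omega)
          rw [min_eq_left (le_trans hroot (le_of_not_gt hlt))]
    · rw [dif_neg hp]
      have hpos0 : pos = 0 := by omega
      subst hpos0
      refine ⟨?_, List.length_set .., ?_⟩
      · intro i hi hil
        rw [List.length_set] at hil
        rw [getD_set_ne h 0 i _ 0 (by omega)]
        by_cases hchild : (i - 1) / 2 = 0
        · rw [hchild, getD_set_self h 0 _ 0 hlen]
          exact (H2 i hi hil hchild).1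
        · rw [getD_set_ne h 0 ((i - 1) / 2) _ 0 hchild]
          exact H1 i hi hil (by omega)
      · rw [if_pos rfl, getD_set_self h 0 _ 0 hlen]

theorem pyHeappush_spec (h : List Int) (x : Int) (H : IsHeap h) :
    IsHeap (pyHeappush h x) ∧ (pyHeappush h x).length = h.length + 1 ∧
      (pyHeappush h x).getD 0 0 = (if h.length = 0 then x else min (h.getD 0 0) x) := by
  unfold pyHeappush
  have hlen : h.length < (h ++ [x]).length := by simp
  have H1 : HoleHeap (h ++ [x]) h.length := by
    intro i hi hil hne
    rw [List.length_append, List.length_singleton] at hil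
    have hi' : i < h.length := by omega
    rw [List.getD_append h [x] 0 i hi', List.getD_append h [x] 0 ((i - 1) / 2) (by omega)]
    exact H i hi hi'
  have H2 : HoleKids (h ++ [x]) h.length x := by
    intro c hc hcl hcp
    rw [List.length_append, List.length_singleton] at hcl
    exfalso; omega
  obtain ⟨A1, A2, A3⟩ := pySiftdown_spec h.length (h ++ [x]) x hlen H1 H2
  refine ⟨A1, by rw [A2]; simp, ?_⟩
  rw [A3]
  by_cases h0 : h.length = 0
  · rw [if_pos h0, if_pos h0]
  · rw [if_neg h0, if_neg h0, List.getD_append h [x] 0 0 (by omega)]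

-- the split differences |2*prefix - total| produced while folding over the elements of l
def dL (total pref : Int) : List Int → List Int
  | [] => []
  | x :: t => |2 * (pref + x) - total| :: dL total (pref + x) t

-- the element-wise step shared by both loops once the index bookkeeping is stripped
def fE (s : List Int × Int × Int) (x : Int) : List Int × Int × Int :=
  (pyHeappush s.1 |(s.2.1 + x) - (s.2.2 - x)|, s.2.1 + x, s.2.2 - x)

-- A's loop from i ≥ 2 on, as a fold of fE over the consumed elements: the heap root is the running min
theorem Afold_elems (total : Int) (l : List Int) :
    ∀ (h : List Int) (va vb : Int), vb = total - va → IsHeap h → 0 < h.length →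
      IsHeap (l.foldl fE (h, va, vb)).1 ∧
      0 < (l.foldl fE (h, va, vb)).1.length ∧
      (l.foldl fE (h, va, vb)).1.getD 0 0 = (dL total va l).foldl min (h.getD 0 0) := by
  induction l with
  | nil => intro h va vb _ H hl; exact ⟨H, hl, rfl⟩
  | cons y t ih =>
    intro h va vb hvb H hl
    have hpush := pyHeappush_spec h (|(va + y) - (vb - y)|) H
    obtain ⟨P1, P2, P3⟩ := hpush
    rw [if_neg (by omega : ¬ h.length = 0)] at P3
    have estep : List.foldl fE (h, va, vb) (y :: t)
        = List.foldl fE (pyHeappush h (|(va + y) - (vb - y)|), va + y, vb - y) t := by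
      rw [List.foldl_cons]
      rfl
    rw [estep]
    obtain ⟨B1, B2, B3⟩ := ih (pyHeappush h (|(va + y) - (vb - y)|)) (va + y) (vb - y)
      (by rw [hvb]; ring) P1 (by omega)
    refine ⟨B1, B2, ?_⟩
    rw [B3, P3]
    have ed : |(va + y) - (vb - y)| = |2 * (va + y) - total| := by rw [hvb]; congr 1; ring
    rw [ed]
    rfl

-- B's loop once best is some b: running min of the same difference list
theorem Bfold_some (total : Int) (l : List Int) :
    ∀ (pref b : Int),
      (l.foldl
        (fun (s : Int × Option Int) (x : Int) =>
          let pref := s.1 + x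
          let d := |2 * pref - total|
          let best := match s.2 with
            | none => some d
            | some bb => if d < bb then some d else some bb
          (pref, best))
        (pref, some b)).2 = some ((dL total pref l).foldl min b) := by
  induction l with
  | nil => intro pref b; rfl
  | cons x t ih =>
    intro pref b
    simp only [List.foldl_cons, dL]
    have : (if |2 * (pref + x) - total| < b then some |2 * (pref + x) - total| else some b)
        = some (min b |2 * (pref + x) - total|) := by
      split_ifs with hd
      · rw [min_eq_right (le_of_lt hd)]
      · rw [min_eq_left (le_of_not_gt hd)]
    simpa [this] using ih (pref + x) (min b |2 * (pref + x) - total|)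

-- index shift for integer ranges
theorem foldl_pyRange_shift {α : Type} (f : α → Int → α) (init : α) (a b : Int) :
    (PySem.List.pyRange (a + 1) (b + 1) 1).foldl f init =
      (PySem.List.pyRange a b 1).foldl (fun s j => f s (j + 1)) init := by
  rw [PySem.List.pyRange_one a b, PySem.List.pyRange_one (a + 1) (b + 1)]
  have : b + 1 - (a + 1) = b - a := by ring
  rw [this, List.foldl_map, List.foldl_map]
  congr 1
  funext s k
  congr 1
  ring

theorem main_eq (A : List Int) (hpre : 2 ≤ A.length) : solution A = solution_alt A := by
  cases A with
  | nil => simp at hpre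
  | cons a0 rest =>
    simp only [List.length_cons] at hpre
    have hrest : rest ≠ [] := by intro h; subst h; simp at hpre
    have hB : solution_alt (a0 :: rest)
        = (dL ((a0 :: rest).sum) (0 + a0) rest.dropLast).foldl min (|2 * (0 + a0) - (a0 :: rest).sum|) := by
      unfold solution_alt
      show (List.foldl (fun (s : Int × Option Int) (x : Int) =>
          let pref := s.1 + x
          let d := |2 * pref - (a0 :: rest).sum|
          let best := match s.2 with
            | none => some d
            | some b => if d < b then some d else some b
          (pref, best)) ((0 : Int), (none : Option Int))
          (PySem.List.slice (a0 :: rest) none (some (-1)))).2.getD 0 = _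
      rw [PySem.List.slice_to_neg_one, List.dropLast_cons_of_ne_nil hrest, List.foldl_cons]
      show (List.foldl (fun (s : Int × Option Int) (x : Int) =>
          let pref := s.1 + x
          let d := |2 * pref - (a0 :: rest).sum|
          let best := match s.2 with
            | none => some d
            | some b => if d < b then some d else some b
          (pref, best)) ((0 : Int) + a0, some (|2 * ((0 : Int) + a0) - (a0 :: rest).sum|))
          rest.dropLast).2.getD 0 = _
      rw [Bfold_some ((a0 :: rest).sum) rest.dropLast (0 + a0) _]
      rfl
    have h0len : (0 : Int) < ((a0 :: rest).length : Int) := by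
      simp only [List.length_cons]; push_cast; omega
    have h1len : (1 : Int) < ((a0 :: rest).length : Int) := by
      simp only [List.length_cons]; push_cast; omega
    have hA : solution (a0 :: rest)
        = (dL ((a0 :: rest).sum) ((a0 :: rest).take 1).sum
            (((a0 :: rest).dropLast).drop 1)).foldl min
            (|((a0 :: rest).take 1).sum - ((a0 :: rest).drop 1).sum|) := by
      unfold solution
      rw [PySem.List.pyRange_one_cons h0len, show (0 : Int) + 1 = 1 by norm_num,
        PySem.List.pyRange_one_cons h1len, show (1 : Int) + 1 = 2 by norm_num]
      simp only [List.foldl_cons]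
      norm_num
      rw [PySem.List.slice_to (a0 :: rest) (by norm_num : (0 : Int) ≤ 1),
        PySem.List.slice_from (a0 :: rest) (by norm_num : (0 : Int) ≤ 1)]
      norm_num
      rw [show pyHeappush [] (|a0 - rest.sum|) = [|a0 - rest.sum|] by
        simp [pyHeappush, pySiftdown]]
      -- strip the dead i = 0 / i = 1 branches
      rw [PySem.List.foldl_congr_mem _ _
        (fun (s : List Int × Int × Int) (i : Int) =>
          fE s (PySem.List.pyGetD (a0 :: rest) (i - 1) 0)) _
        (by
          intro acc x hx
          rw [PySem.List.mem_pyRange_one] at hx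
          rw [if_neg (by omega), if_neg (by omega)]
          rfl)]
      -- shift the index range from [2, n) to [1, n-1)
      rw [show (2 : Int) = 1 + 1 by norm_num, foldl_pyRange_shift]
      -- read the consumed element through dropLast and fold over the elements
      rw [PySem.List.foldl_congr_mem _ _
        (fun (s : List Int × Int × Int) (j : Int) =>
          fE s (PySem.List.pyGetD ((a0 :: rest).dropLast) j 0)) _
        (by
          intro acc j hj
          rw [PySem.List.mem_pyRange_one] at hj
          have hjlt : j < ((a0 :: rest).length : Int) := by
            simp only [List.length_cons]; push_cast; omega
          have hjlt' : j < (((a0 :: rest).dropLast).length : Int) := by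
            simp only [List.length_dropLast, List.length_cons]; push_cast; omega
          show fE acc (PySem.List.pyGetD (a0 :: rest) (j + 1 - 1) 0)
            = fE acc (PySem.List.pyGetD ((a0 :: rest).dropLast) j 0)
          have e1 : j + 1 - 1 = j := by ring
          rw [e1]
          congr 1
          rw [PySem.List.pyGetD_eq_getElem _ 0 (by omega) hjlt,
            PySem.List.pyGetD_eq_getElem _ 0 (by omega) hjlt',
            List.getElem_dropLast])]
      rw [show (rest.length : Int) = PySem.List.len ((a0 :: rest).dropLast) by
        simp [PySem.List.len_eq]]
      rw [PySem.List.foldl_pyRange_pyGetD ((a0 :: rest).dropLast) 0 fE _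
        (by norm_num : (0 : Int) ≤ 1)]
      have hheap1 : IsHeap [|a0 - rest.sum|] := by
        intro i hi hil
        simp at hil
        omega
      obtain ⟨_, _, h3⟩ := Afold_elems ((a0 :: rest).sum) (((a0 :: rest).dropLast).drop (1 : Int).toNat)
        [|a0 - rest.sum|] a0 rest.sum (by simp) hheap1 (by norm_num)
      rw [PySem.List.pyGetD_zero, h3]
      norm_num [List.drop_one]
    rw [hA, hB, List.dropLast_cons_of_ne_nil hrest]
    norm_num
    have : a0 - rest.sum = 2 * a0 - (a0 + rest.sum) := by ring
    rw [this]

-- ===== VERDICT (by name: the statement is the Claim_ definition above) =====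
theorem solution_spec : Claim_equal_solution := by
  unfold Claim_equal_solution
  intro A _ hpre
  unfold Spec_solution
  exact main_eq A hpre
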